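-- pv_equiv track=rewrite | github.com/natelgrw/tex_transformer | latex_generator.py | _transform_bullets_to_latex
-- ===== SOURCE A (Python) =====
-- def _transform_bullets_to_latex(text):
--     r"""
--     Converts lines starting with '> ' into \begin{itemize}\item[>] ... \end{itemize}
--     Handles grouping if lines are consecutive, or separate lists if separated.
--     """
--     lines = text.split('\n')
--     new_lines = []
--     in_list = False
--
--     for line in lines:
--         stripped = line.strip()
--         if stripped.startswith(">"):
--             # Clean content: remove '> ' or '>'
--             content = stripped[1:].strip()
--
--             if not in_list:
--                 new_lines.append(r"\begin{itemize}")
--                 in_list = True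
--
--             # Use [>] as label
--             new_lines.append(r"\item[>] " + content)
--         else:
--             if in_list:
--                 new_lines.append(r"\end{itemize}")
--                 in_list = False
--
--             new_lines.append(line)
--
--     # Close any open list at end
--     if in_list:
--          new_lines.append(r"\end{itemize}")
--
--     return "\n".join(new_lines)
-- ===== SOURCE B (Python) =====
-- def _is_bullet(line):
--     return line.strip().startswith(">")
--
--
-- def _item(line):
--     return "\\item[>] " + line.strip()[1:].strip()
--
--
-- def _transform_bullets_to_latex(text):
--     lines = text.split('\n')
--     out = []
--     i, n = 0, len(lines)
--     while i < n:
--         k = _is_bullet(lines[i])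
--         j = i + 1
--         while j < n and _is_bullet(lines[j]) == k:
--             j += 1
--         run = lines[i:j]
--         if k:
--             out.append("\\begin{itemize}")
--             out.extend(_item(l) for l in run)
--             out.append("\\end{itemize}")
--         else:
--             out.extend(run)
--         i = j
--     return "\n".join(out)
-- ===== Notes on version B (the rewrite author's own statement) =====
-- stated objective: alternative
-- what changed: B partitions the split lines into maximal runs of bullet/non-bullet lines and emits each run as a whole block (itemize wrapper around the run, or the run verbatim), instead of A's line-by-line scan carrying an in_list state flag.
import Mathlib
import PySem

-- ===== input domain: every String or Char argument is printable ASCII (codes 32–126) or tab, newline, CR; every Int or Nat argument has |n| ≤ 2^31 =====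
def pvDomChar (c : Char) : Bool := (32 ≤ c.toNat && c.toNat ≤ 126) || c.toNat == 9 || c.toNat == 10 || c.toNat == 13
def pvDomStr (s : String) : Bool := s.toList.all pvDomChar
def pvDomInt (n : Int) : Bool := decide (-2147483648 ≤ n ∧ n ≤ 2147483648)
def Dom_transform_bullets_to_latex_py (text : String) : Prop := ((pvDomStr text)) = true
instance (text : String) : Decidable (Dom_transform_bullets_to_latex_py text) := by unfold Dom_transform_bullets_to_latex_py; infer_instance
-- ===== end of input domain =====

-- B replaces A's line-by-line scan with an in_list flag by a partition of the lines into
-- maximal bullet / non-bullet runs, each emitted as a whole block; same output, alternative decomposition.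

-- ===== PORT A =====
-- one loop step of A's for-loop: state = (new_lines, in_list)
def pvStepA (st : List String × Bool) (line : String) : List String × Bool :=
  let stripped := PySem.Str.strip line
  if PySem.Str.startswith stripped ">" then
    let content := PySem.Str.strip (PySem.Str.slice stripped (some 1) none)
    let st1 := if !st.2 then (st.1 ++ ["\\begin{itemize}"], true) else st
    (st1.1 ++ ["\\item[>] " ++ content], st1.2)
  else
    let st1 := if st.2 then (st.1 ++ ["\\end{itemize}"], false) else st
    (st1.1 ++ [line], st1.2)

def transform_bullets_to_latex_py (text : String) : String :=
  let lines := (PySem.Str.split? text "\n").getD []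
  let st := lines.foldl pvStepA ([], false)
  let new_lines := if st.2 then st.1 ++ ["\\end{itemize}"] else st.1
  PySem.Str.join "\n" new_lines

-- ===== PORT B =====
def pvIsBullet (line : String) : Bool :=
  PySem.Str.startswith (PySem.Str.strip line) ">"

def pvItem (line : String) : String :=
  "\\item[>] " ++ PySem.Str.strip (PySem.Str.slice (PySem.Str.strip line) (some 1) none)

-- B's outer while-loop over maximal runs (inner while = takeWhile/dropWhile on the tail)
def pvGroups : List String → List String
  | [] => []
  | l :: rest =>
    let k := pvIsBullet l
    let run := l :: rest.takeWhile (fun x => pvIsBullet x == k)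
    let rest' := rest.dropWhile (fun x => pvIsBullet x == k)
    (if k then "\\begin{itemize}" :: (run.map pvItem ++ ["\\end{itemize}"]) else run)
      ++ pvGroups rest'
termination_by ls => ls.length
decreasing_by
  simp only [List.length_cons]
  exact Nat.lt_succ_of_le (List.length_dropWhile_le _ _)

def transform_bullets_to_latex_py_alt (text : String) : String :=
  PySem.Str.join "\n" (pvGroups ((PySem.Str.split? text "\n").getD []))

-- ===== PRECONDITION & SPEC =====
def Spec_transform_bullets_to_latex_py (text : String) (out : String) : Prop := out = transform_bullets_to_latex_py_alt text
instance (text : String) (out : String) : Decidable (Spec_transform_bullets_to_latex_py text out) := by unfold Spec_transform_bullets_to_latex_py; infer_instance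

-- ===== CLAIM (what is proved, stated in full; the proofs are below) =====
def Claim_equal_transform_bullets_to_latex_py : Prop := ∀ (text : String), Dom_transform_bullets_to_latex_py text → Spec_transform_bullets_to_latex_py text (transform_bullets_to_latex_py text)

-- ===== LEMMAS AND PROOFS =====

-- A's final "close any open list" step
def pvFinish (st : List String × Bool) : List String :=
  if st.2 then st.1 ++ ["\\end{itemize}"] else st.1

lemma pvFinish_append (a x : List String) (b : Bool) :
    pvFinish (a ++ x, b) = a ++ pvFinish (x, b) := by
  unfold pvFinish; cases b <;> simp

lemma pvStepA_bullet (st : List String × Bool) (l : String) (h : pvIsBullet l = true) :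
    pvStepA st l =
      (st.1 ++ (if st.2 then [pvItem l] else ["\\begin{itemize}", pvItem l]), true) := by
  unfold pvStepA pvIsBullet pvItem at *
  rw [if_pos h]
  cases hb : st.2 <;> simp [hb]

lemma pvStepA_plain (st : List String × Bool) (l : String) (h : pvIsBullet l = false) :
    pvStepA st l = ((if st.2 then st.1 ++ ["\\end{itemize}"] else st.1) ++ [l], false) := by
  unfold pvStepA pvIsBullet at *
  rw [if_neg (by rw [h]; simp)]
  cases hb : st.2 <;> simp [hb]

lemma pvStepA_shift (acc : List String) (b : Bool) (l : String) :
    pvStepA (acc, b) l = (acc ++ (pvStepA ([], b) l).1, (pvStepA ([], b) l).2) := by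
  cases h : pvIsBullet l
  · rw [pvStepA_plain _ _ h, pvStepA_plain _ _ h]; cases b <;> simp
  · rw [pvStepA_bullet _ _ h, pvStepA_bullet _ _ h]; cases b <;> simp

lemma foldA_shift (ls : List String) : ∀ (acc : List String) (b : Bool),
    List.foldl pvStepA (acc, b) ls =
      (acc ++ (List.foldl pvStepA ([], b) ls).1, (List.foldl pvStepA ([], b) ls).2) := by
  induction ls with
  | nil => intro acc b; simp
  | cons l ls ih =>
    intro acc b
    simp only [List.foldl_cons]
    rw [pvStepA_shift acc b l, ih, ih (pvStepA ([], b) l).1 (pvStepA ([], b) l).2]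
    simp

lemma foldA_run_true (run : List String) : ∀ (acc : List String),
    (∀ x ∈ run, pvIsBullet x = true) →
    List.foldl pvStepA (acc, true) run = (acc ++ run.map pvItem, true) := by
  induction run with
  | nil => intro acc _; simp
  | cons r rs ih =>
    intro acc h
    simp only [List.foldl_cons]
    rw [pvStepA_bullet _ _ (h r (by simp)), if_pos rfl]
    rw [ih (acc ++ [pvItem r]) (fun x hx => h x (by simp [hx]))]
    simp

lemma foldA_run_false (run : List String) : ∀ (acc : List String),
    (∀ x ∈ run, pvIsBullet x = false) →
    List.foldl pvStepA (acc, false) run = (acc ++ run, false) := by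
  induction run with
  | nil => intro acc _; simp
  | cons r rs ih =>
    intro acc h
    simp only [List.foldl_cons]
    rw [pvStepA_plain _ _ (h r (by simp)), if_neg (by simp)]
    rw [ih (acc ++ [r]) (fun x hx => h x (by simp [hx]))]
    simp

lemma dropWhile_head_false {α : Type} (p : α → Bool) :
    ∀ (l : List α) (h : α) (t : List α), l.dropWhile p = h :: t → p h = false := by
  intro l
  induction l with
  | nil => intro h t hd; simp at hd
  | cons a l ih =>
    intro h t hd
    by_cases hp : p a
    · exact ih h t (by simpa [hp] using hd)
    · simp [List.dropWhile_cons, hp] at hd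
      rw [← hd.1]; simpa using hp

set_option maxHeartbeats 1000000 in
theorem pvMain (ls0 : List String) :
    pvFinish (List.foldl pvStepA ([], false) ls0) = pvGroups ls0 := by
  induction hn : ls0.length using Nat.strong_induction_on generalizing ls0 with
  | _ n ih =>
  subst hn
  cases ls0 with
  | nil => simp [pvGroups, pvFinish]
  | cons l rest =>
    cases hk : pvIsBullet l with
    | true =>
      set run' := rest.takeWhile (fun x => pvIsBullet x) with hrun
      set rest' := rest.dropWhile (fun x => pvIsBullet x) with hrest
      have hsplit : rest = run' ++ rest' := (List.takeWhile_append_dropWhile).symm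
      have hrunb : ∀ x ∈ run', pvIsBullet x = true := by
        intro x hx
        simpa using List.mem_takeWhile_imp hx
      have hlen : rest'.length < (l :: rest).length := by
        simp only [hrest, List.length_cons]
        exact Nat.lt_succ_of_le (List.length_dropWhile_le _ _)
      have h1 : List.foldl pvStepA ([], false) (l :: rest)
          = List.foldl pvStepA ("\\begin{itemize}" :: pvItem l :: run'.map pvItem, true) rest' := by
        conv_lhs => rw [show l :: rest = l :: (run' ++ rest') from by rw [← hsplit]]
        simp only [List.foldl_cons, List.foldl_append]
        rw [pvStepA_bullet _ _ hk, if_neg (by simp)]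
        rw [foldA_run_true run' _ hrunb]
        simp
      have hgroups : pvGroups (l :: rest)
          = ("\\begin{itemize}" :: ((l :: run').map pvItem ++ ["\\end{itemize}"])) ++ pvGroups rest' := by
        conv_lhs => rw [pvGroups]
        simp [hk, ← hrun, ← hrest]
      rw [h1, hgroups]
      cases hrc : rest' with
      | nil => simp [pvFinish, pvGroups]
      | cons h t =>
        have hh : pvIsBullet h = false := by
          have := dropWhile_head_false (fun x => pvIsBullet x) rest h t (by rw [← hrest, hrc])
          simpa using this
        have hswitch : pvStepA (("\\begin{itemize}" :: pvItem l :: run'.map pvItem), true) h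
            = pvStepA (("\\begin{itemize}" :: pvItem l :: run'.map pvItem) ++ ["\\end{itemize}"], false) h := by
          rw [pvStepA_plain _ _ hh, pvStepA_plain _ _ hh]
          simp
        calc pvFinish (List.foldl pvStepA (("\\begin{itemize}" :: pvItem l :: run'.map pvItem), true) (h :: t))
            = pvFinish (List.foldl pvStepA ((("\\begin{itemize}" :: pvItem l :: run'.map pvItem) ++ ["\\end{itemize}"]), false) (h :: t)) := by
              simp only [List.foldl_cons]; rw [hswitch]
          _ = ("\\begin{itemize}" :: pvItem l :: run'.map pvItem) ++ ["\\end{itemize}"]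
              ++ pvFinish (List.foldl pvStepA ([], false) (h :: t)) := by
              rw [foldA_shift, pvFinish_append]
          _ = ("\\begin{itemize}" :: ((l :: run').map pvItem ++ ["\\end{itemize}"])) ++ pvGroups (h :: t) := by
              rw [← hrc, ih rest'.length hlen rest' rfl, hrc]
              simp
    | false =>
      set run' := rest.takeWhile (fun x => !pvIsBullet x) with hrun
      set rest' := rest.dropWhile (fun x => !pvIsBullet x) with hrest
      have hsplit : rest = run' ++ rest' := (List.takeWhile_append_dropWhile).symm
      have hrunb : ∀ x ∈ (l :: run'), pvIsBullet x = false := by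
        intro x hx
        cases hx with
        | head => exact hk
        | tail _ hx => simpa using List.mem_takeWhile_imp hx
      have hlen : rest'.length < (l :: rest).length := by
        simp only [hrest, List.length_cons]
        exact Nat.lt_succ_of_le (List.length_dropWhile_le _ _)
      have h1 : List.foldl pvStepA ([], false) (l :: rest)
          = List.foldl pvStepA ((l :: run'), false) rest' := by
        conv_lhs => rw [show l :: rest = (l :: run') ++ rest' from by simp [← hsplit]]
        rw [List.foldl_append, foldA_run_false _ _ hrunb]
        simp
      have hgroups : pvGroups (l :: rest) = (l :: run') ++ pvGroups rest' := by
        conv_lhs => rw [pvGroups]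
        simp [hk, ← hrun, ← hrest]
      rw [h1, hgroups, foldA_shift, pvFinish_append, ih rest'.length hlen rest' rfl]

-- ===== VERDICT (by name: the statement is the Claim_ definition above) =====
theorem transform_bullets_to_latex_py_spec : Claim_equal_transform_bullets_to_latex_py := by
  intro text _
  unfold Spec_transform_bullets_to_latex_py transform_bullets_to_latex_py transform_bullets_to_latex_py_alt
  simp only []
  exact congrArg (PySem.Str.join "\n") (pvMain _)
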